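-- pv_equiv track=rewrite | github.com/sevdenurunlu/socket-error-detection-project | utils.py | compute_2d_parity
-- ===== SOURCE A (Python) =====
-- def compute_2d_parity(text: str) -> str:
--     """
--     2D parity:
--     - Her karakter 8 bitlik satır (row)
--     - Her satır için bir parity biti
--     - Her sütun (bit pozisyonu) için bir parity biti
--
--     Kontrol bilgisi formatı: "R<rowparity>-C<colparity>"
--     Örnek: R0101-C11001010
--     """
--     if not text:
--         return "R-C"
--
--     rows = [f'{ord(c):08b}' for c in text]
--
--     # Satır (row) paritileri
--     row_parity_bits = []
--     for row in rows:
--         ones = row.count('1')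
--         row_parity_bits.append('0' if ones % 2 == 0 else '1')
--     row_parity = ''.join(row_parity_bits)
--
--     # Sütun (column) paritileri (8 bitlik sütunlar)
--     col_parity_bits = []
--     for col in range(8):
--         ones = sum(1 for row in rows if row[col] == '1')
--         col_parity_bits.append('0' if ones % 2 == 0 else '1')
--     col_parity = ''.join(col_parity_bits)
--
--     return f"R{row_parity}-C{col_parity}"
-- ===== SOURCE B (Python) =====
-- def compute_2d_parity(text: str) -> str:
--     if not text:
--         return "R-C"
--     acc = 0
--     row_bits = []
--     for c in text:
--         v = ord(c)
--         row_bits.append('1' if bin(v).count('1') % 2 else '0')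
--         acc ^= v
--     return f"R{''.join(row_bits)}-C{acc:08b}"
-- ===== Notes on version B (the rewrite author's own statement) =====
-- stated objective: faster
-- what changed: Replaced the bit-string matrix plus an 8-way nested column scan with a single pass that XOR-folds the character codes into one accumulator (column parities = bits of the XOR) and takes each row parity from the popcount of the code.
import Mathlib
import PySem

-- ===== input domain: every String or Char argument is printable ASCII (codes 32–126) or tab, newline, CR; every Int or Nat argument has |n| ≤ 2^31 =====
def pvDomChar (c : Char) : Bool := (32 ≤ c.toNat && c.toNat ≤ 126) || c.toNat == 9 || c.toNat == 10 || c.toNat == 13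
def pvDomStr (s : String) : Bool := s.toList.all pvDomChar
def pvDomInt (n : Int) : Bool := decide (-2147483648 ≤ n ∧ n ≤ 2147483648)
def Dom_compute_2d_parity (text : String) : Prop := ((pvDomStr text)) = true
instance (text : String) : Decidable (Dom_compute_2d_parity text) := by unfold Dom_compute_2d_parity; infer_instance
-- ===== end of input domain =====

-- B replaces A's bit-string matrix and 8 extra column scans by one pass that XOR-folds the
-- character codes (the bits of the accumulator ARE the column parities); objective: faster (constant factor).

-- ===== PORT A =====
-- f'{n:08b}' for a code point n: exact for n < 256 (all of Dom; the format pads to 8 digits there)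
def bits8 (n : Nat) : List Char :=
  (List.range 8).map (fun i => if n.testBit (7 - i) then '1' else '0')

def compute_2d_parity (text : String) : String :=
  if text.toList = [] then "R-C"
  else
    -- rows = [f'{ord(c):08b}' for c in text]
    let rows := text.toList.map (fun c => bits8 c.toNat)
    -- row parities
    let row_parity := rows.map (fun row => if row.count '1' % 2 = 0 then '0' else '1')
    -- column parities: sum(1 for row in rows if row[col] == '1')  (row[col] in range: each row has 8 chars)
    let col_parity := (List.range 8).map (fun col =>
      if (rows.countP (fun row => row.getD col ' ' = '1')) % 2 = 0 then '0' else '1')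
    String.ofList ('R' :: row_parity ++ '-' :: 'C' :: col_parity)

-- ===== PORT B =====
-- single pass: bin(v).count('1') is PySem.Int.bitCount; acc ^= v; f'{acc:08b}' = bits8 acc (acc < 256 on Dom)
def compute_2d_parity_alt (text : String) : String :=
  if text.toList = [] then "R-C"
  else
    let st := text.toList.foldl
      (fun (st : List Char × Nat) c =>
        (st.1 ++ [if PySem.Int.bitCount (c.toNat : Int) % 2 = 1 then '1' else '0'],
         st.2 ^^^ c.toNat))
      ([], 0)
    String.ofList ('R' :: st.1 ++ '-' :: 'C' :: bits8 st.2)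

-- ===== PRECONDITION & SPEC =====
def Spec_compute_2d_parity (text : String) (out : String) : Prop := out = compute_2d_parity_alt text
instance (text : String) (out : String) : Decidable (Spec_compute_2d_parity text out) := by unfold Spec_compute_2d_parity; infer_instance

-- ===== CLAIM (what is proved, stated in full; the proofs are below) =====
def Claim_equal_compute_2d_parity : Prop := ∀ (text : String), Dom_compute_2d_parity text → Spec_compute_2d_parity text (compute_2d_parity text)

-- ===== LEMMAS AND PROOFS =====

-- the product-state fold splits into the row-bit map and the xor fold
lemma fold_split (l : List Char) (bs : List Char) (a : Nat) :
    l.foldl (fun (st : List Char × Nat) c =>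
        (st.1 ++ [if PySem.Int.bitCount (c.toNat : Int) % 2 = 1 then '1' else '0'],
         st.2 ^^^ c.toNat)) (bs, a)
      = (bs ++ l.map (fun c => if PySem.Int.bitCount (c.toNat : Int) % 2 = 1 then '1' else '0'),
         l.foldl (fun (a : Nat) (c : Char) => a ^^^ c.toNat) a) := by
  induction l generalizing bs a with
  | nil => simp
  | cons h t ih => simp [ih]

-- per character (Dom ⇒ code ≤ 126): A's row-parity char = B's row-parity char
lemma row_char_eq : ∀ n : Fin 128,
    (if (bits8 (n : Nat)).count '1' % 2 = 0 then '0' else '1')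
      = (if PySem.Int.bitCount ((n : Nat) : Int) % 2 = 1 then '1' else '0') := by decide

-- test bit k of an xor-fold = parity of the count of elements with bit k set
lemma xorfold_testBit (l : List Nat) (a : Nat) (k : Nat) :
    (l.foldl (fun x n => x ^^^ n) a).testBit k
      = ((a.testBit k).xor (decide ((l.countP (fun n => n.testBit k)) % 2 = 1))) := by
  induction l generalizing a with
  | nil => simp
  | cons h t ih =>
    simp only [List.foldl_cons, ih, List.countP_cons, Nat.testBit_xor]
    by_cases hb : h.testBit k <;>
      rcases Nat.even_or_odd (t.countP (fun n => n.testBit k)) with he | he <;>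
        simp_all [Nat.even_iff, Nat.odd_iff, Nat.add_mod, Bool.xor_comm]

lemma getD_bits8 (n : Nat) (col : Nat) (h : col < 8) :
    (bits8 n).getD col ' ' = (if n.testBit (7 - col) then '1' else '0') := by
  simp [bits8, List.getD, h]

-- ===== VERDICT (by name: the statement is the Claim_ definition above) =====
theorem compute_2d_parity_spec : Claim_equal_compute_2d_parity := by
  intro text hdom
  unfold Spec_compute_2d_parity compute_2d_parity compute_2d_parity_alt
  by_cases hnil : text.toList = []
  · simp [hnil]
  · simp only [hnil, if_false]
    rw [fold_split]
    simp only [List.nil_append]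
    have hrow : (text.toList.map (fun c => bits8 c.toNat)).map
          (fun row => if row.count '1' % 2 = 0 then '0' else '1')
        = text.toList.map (fun c => if PySem.Int.bitCount (c.toNat : Int) % 2 = 1 then '1' else '0') := by
      rw [List.map_map]
      refine List.map_congr_left ?_
      intro c hc
      have hdc : pvDomChar c = true := (List.all_eq_true.mp hdom) c hc
      have hlt : c.toNat < 128 := by simp [pvDomChar] at hdc; omega
      simpa using row_char_eq ⟨c.toNat, hlt⟩
    have hbitacc := xorfold_testBit (text.toList.map (fun c : Char => c.toNat)) 0
    rw [List.foldl_map] at hbitacc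
    have hcol : (List.range 8).map (fun col =>
          if ((text.toList.map (fun c => bits8 c.toNat)).countP
              (fun row => row.getD col ' ' = '1')) % 2 = 0 then '0' else '1')
        = bits8 (text.toList.foldl (fun (a : Nat) (c : Char) => a ^^^ c.toNat) 0) := by
      show _ = (List.range 8).map
        (fun i => if (text.toList.foldl (fun (a : Nat) (c : Char) => a ^^^ c.toNat) 0).testBit (7 - i) then '1' else '0')
      refine List.map_congr_left ?_
      intro col hcol
      have hc8 : col < 8 := by simpa [List.mem_range] using hcol
      have hcnt : (text.toList.map (fun c => bits8 c.toNat)).countP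
            (fun row => row.getD col ' ' = '1')
          = (text.toList.map (fun c : Char => c.toNat)).countP (fun n => n.testBit (7 - col)) := by
        rw [List.countP_map, List.countP_map]
        refine List.countP_congr ?_
        intro c _
        simp only [Function.comp_apply, decide_eq_true_eq]
        rw [getD_bits8 _ _ hc8]
        by_cases h : c.toNat.testBit (7 - col) <;> simp [h]
      rw [hcnt, hbitacc (7 - col)]
      simp only [Nat.zero_testBit, Bool.false_xor]
      rcases Nat.mod_two_eq_zero_or_one ((text.toList.map (fun c : Char => c.toNat)).countP
          (fun n => n.testBit (7 - col))) with h | h <;> rw [h] <;> norm_num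
    rw [hrow, hcol]
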